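-- pv_equiv track=rewrite | github.com/QuEraComputing/bloqade-lanes | python/tests/heuristics/_perf_benchmark.py | brick_wall
-- ===== SOURCE A (Python) =====
-- def brick_wall(n, depth):
--     qubits = tuple(range(n))
--     layers = []
--     for d in range(depth):
--         even = d % 2 == 0
--         layers.append(
--             tuple((i, i + 1) for i in range(0 if even else 1, n - 1, 2))
--         )
--     return qubits, layers
-- ===== SOURCE B (Python) =====
-- def brick_wall(n, depth):
--     # One pass over consecutive-qubit pairs, dealing them alternately into the
--     # even and odd layer; the layer list is then [even, odd] repeated and cut.
--     even, odd = [], []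
--     take_even = True
--     for p in zip(range(n), range(1, n)):
--         (even if take_even else odd).append(p)
--         take_even = not take_even
--     layers = ([tuple(even), tuple(odd)] * ((max(depth, 0) + 1) // 2))[:depth]
--     return tuple(range(n)), layers
-- ===== Notes on version B (the rewrite author's own statement) =====
-- stated objective: alternative
-- what changed: B builds consecutive-qubit pairs once by zipping range(n) with range(1,n), deals them alternately into the even and odd layer in a single pass (instead of regenerating a step-2 range per depth iteration), and forms the layer list by replicating [even, odd] and cutting it to depth.
import Mathlib
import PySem

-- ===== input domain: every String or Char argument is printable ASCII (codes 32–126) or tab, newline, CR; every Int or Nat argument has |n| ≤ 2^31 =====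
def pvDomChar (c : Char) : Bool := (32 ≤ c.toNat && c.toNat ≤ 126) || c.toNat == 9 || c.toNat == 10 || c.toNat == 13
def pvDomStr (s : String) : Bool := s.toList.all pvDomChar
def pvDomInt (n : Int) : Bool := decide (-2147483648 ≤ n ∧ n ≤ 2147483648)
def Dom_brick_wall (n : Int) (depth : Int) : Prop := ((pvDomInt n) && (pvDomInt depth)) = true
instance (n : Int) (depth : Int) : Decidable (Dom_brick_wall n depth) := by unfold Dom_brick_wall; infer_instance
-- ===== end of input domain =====

-- B deals the consecutive-qubit pairs (from one zip) alternately into the two layers in a single pass, then builds the layer list by replicating [even,odd] and cutting to depth; alternative decomposition, same results.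


-- ===== PORT A =====
def brick_wall (n : Int) (depth : Int) : List Int × (List (List (Int × Int))) :=
  let qubits := PySem.List.pyRange 0 n 1
  let layers := (PySem.List.pyRange 0 depth 1).foldl
    (fun acc d =>
      let even := PySem.Int.mod d 2 = 0
      acc ++ [(PySem.List.pyRange (if even then 0 else 1) (n - 1) 2).map (fun i => (i, i + 1))])
    []
  (qubits, layers)

-- ===== PORT B =====
-- the loop body '(even if take_even else odd).append(p); take_even = not take_even'
def bwStep (st : List (Int × Int) × List (Int × Int) × Bool) (p : Int × Int) :
    List (Int × Int) × List (Int × Int) × Bool :=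
  if st.2.2 then (st.1 ++ [p], st.2.1, false) else (st.1, st.2.1 ++ [p], true)

def brick_wall_alt (n : Int) (depth : Int) : List Int × (List (List (Int × Int))) :=
  let st := (List.zip (PySem.List.pyRange 0 n 1) (PySem.List.pyRange 1 n 1)).foldl bwStep ([], [], true)
  let k := PySem.Int.floordiv (max depth 0 + 1) 2
  let layers := PySem.List.slice ((List.replicate k.toNat [st.1, st.2.1]).flatten) none (some depth)
  (PySem.List.pyRange 0 n 1, layers)

-- ===== PRECONDITION & SPEC =====
def Spec_brick_wall (n : Int) (depth : Int) (out : List Int × (List (List (Int × Int)))) : Prop := out = brick_wall_alt n depth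
instance (n : Int) (depth : Int) (out : List Int × (List (List (Int × Int)))) : Decidable (Spec_brick_wall n depth out) := by unfold Spec_brick_wall; infer_instance

-- ===== CLAIM (what is proved, stated in full; the proofs are below) =====
def Claim_equal_brick_wall : Prop := ∀ (n : Int) (depth : Int), Dom_brick_wall n depth → Spec_brick_wall n depth (brick_wall n depth)

-- ===== LEMMAS AND PROOFS =====

-- elements of l at even positions / odd positions
def pvEvens {α : Type} : List α → List α
  | [] => []
  | [x] => [x]
  | x :: _ :: t => x :: pvEvens t

def pvOdds {α : Type} (l : List α) : List α := pvEvens (l.drop 1)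

theorem pvEvens_cons {α : Type} (x : α) (t : List α) :
    pvEvens (x :: t) = x :: pvEvens (t.drop 1) := by
  cases t <;> simp [pvEvens]

theorem pvEvens_map {α β : Type} (f : α → β) : ∀ l : List α, pvEvens (l.map f) = (pvEvens l).map f
  | [] => rfl
  | [_] => rfl
  | x :: y :: t => by simp [pvEvens, pvEvens_map f t]

theorem pvOdds_map {α β : Type} (f : α → β) (l : List α) :
    pvOdds (l.map f) = (pvOdds l).map f := by
  unfold pvOdds
  rw [← List.map_drop, pvEvens_map]

theorem bwFold_distrib : ∀ (l : List (Int × Int)) (e o : List (Int × Int)) (b : Bool),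
    l.foldl bwStep (e, o, b) =
      (e ++ (if b then pvEvens l else pvOdds l),
       o ++ (if b then pvOdds l else pvEvens l),
       b.xor (l.length % 2 == 1)) := by
  intro l
  induction l with
  | nil => intro e o b; simp [pvEvens, pvOdds]
  | cons x t ih =>
      intro e o b
      have hx : pvEvens (x :: t) = x :: pvOdds t := by
        rw [pvEvens_cons]; rfl
      have ho : pvOdds (x :: t) = pvEvens t := by
        simp [pvOdds]
      cases b with
      | true =>
          simp only [List.foldl_cons, bwStep]
          rw [ih]
          simp [hx, ho, Nat.add_mod]
          rcases Nat.mod_two_eq_zero_or_one t.length with h | h <;> simp [h]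
      | false =>
          simp only [List.foldl_cons, bwStep]
          rw [if_neg (by simp), ih]
          simp [hx, ho, Nat.add_mod]
          rcases Nat.mod_two_eq_zero_or_one t.length with h | h <;> simp [h]

theorem drop_one_pyRange (a b : Int) :
    (PySem.List.pyRange a b 1).drop 1 = PySem.List.pyRange (a + 1) b 1 := by
  by_cases h : a < b
  · rw [PySem.List.pyRange_one_cons h]; simp
  · rw [PySem.List.pyRange_one_eq_nil (by omega), PySem.List.pyRange_one_eq_nil (by omega)]
    simp

theorem pyRange_two_nil {a b : Int} (h : b ≤ a) : PySem.List.pyRange a b 2 = [] := by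
  rw [PySem.List.pyRange_of_pos _ _ (by norm_num), if_neg (by omega)]
  simp

theorem pyRange_two_cons {a b : Int} (h : a < b) :
    PySem.List.pyRange a b 2 = a :: PySem.List.pyRange (a + 2) b 2 := by
  rw [PySem.List.pyRange_of_pos _ _ (by norm_num : (0:Int) < 2),
      PySem.List.pyRange_of_pos _ _ (by norm_num : (0:Int) < 2), if_pos h]
  by_cases hc : a + 2 < b
  · rw [if_pos hc]
    have hcount : ((b - a + 2 - 1) / 2).toNat = ((b - (a + 2) + 2 - 1) / 2).toNat + 1 := by
      omega
    rw [hcount, List.range_succ_eq_map]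
    simp only [List.map_cons, List.map_map]
    refine congrArg₂ _ (by ring) ?_
    apply List.map_congr_left
    intro k _
    simp [Function.comp, Nat.succ_eq_add_one]
    ring
  · rw [if_neg hc]
    have hcount : ((b - a + 2 - 1) / 2).toNat = 1 := by omega
    rw [hcount]
    simp [List.range_succ]

theorem pvEvens_pyRange : ∀ (m : Nat) (a b : Int), (b - a).toNat ≤ m →
    pvEvens (PySem.List.pyRange a b 1) = PySem.List.pyRange a b 2 := by
  intro m
  induction m with
  | zero =>
      intro a b hm
      rw [PySem.List.pyRange_one_eq_nil (by omega), pyRange_two_nil (by omega)]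
      rfl
  | succ m ih =>
      intro a b hm
      by_cases h : a < b
      · have h2 : a + 1 + 1 = a + 2 := by ring
        rw [PySem.List.pyRange_one_cons h, pvEvens_cons, drop_one_pyRange, h2,
            ih (a + 2) b (by omega)]
        rw [pyRange_two_cons h]
      · rw [PySem.List.pyRange_one_eq_nil (by omega), pyRange_two_nil (by omega)]
        rfl

theorem pvOdds_pyRange (a b : Int) :
    pvOdds (PySem.List.pyRange a b 1) = PySem.List.pyRange (a + 1) b 2 := by
  unfold pvOdds
  rw [drop_one_pyRange, pvEvens_pyRange ((b - (a + 1)).toNat) (a + 1) b le_rfl]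

theorem zip_ranges (n : Int) :
    List.zip (PySem.List.pyRange 0 n 1) (PySem.List.pyRange 1 n 1)
      = (PySem.List.pyRange 0 (n - 1) 1).map (fun i => (i, i + 1)) := by
  apply List.ext_getElem
  · simp [List.length_zip, PySem.List.length_pyRange_one]
  · intro i h1 h2
    simp only [List.getElem_zip, List.getElem_map]
    have hi1 : i < (PySem.List.pyRange 0 n 1).length := by
      simp [PySem.List.length_pyRange_one] at h1 ⊢; omega
    have hi2 : i < (PySem.List.pyRange 1 n 1).length := by
      simp [PySem.List.length_pyRange_one] at h1 ⊢; omega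
    rw [PySem.List.getElem_pyRange_one (k := i) (h := hi1),
        PySem.List.getElem_pyRange_one (k := i) (h := hi2),
        PySem.List.getElem_pyRange_one]
    simp [Prod.ext_iff]
    omega

theorem foldl_append_map {α β : Type} (f : α → β) (l : List α) (init : List β) :
    l.foldl (fun acc d => acc ++ [f d]) init = init ++ l.map f := by
  induction l generalizing init with
  | nil => simp
  | cons x xs ih => simp [List.foldl, ih]

theorem shift_pyRange (b : Int) :
    PySem.List.pyRange 2 (b + 2) 1 = (PySem.List.pyRange 0 b 1).map (fun x => x + 2) := by
  rw [PySem.List.pyRange_one, PySem.List.pyRange_one]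
  have : b + 2 - 2 = b - 0 := by ring
  rw [this, List.map_map]
  apply List.map_congr_left
  intro k _
  simp [Function.comp]
  ring

theorem repFlatten (E O : List (Int × Int)) : ∀ j : Nat,
    (PySem.List.pyRange 0 (2 * (j : Int)) 1).map
        (fun d => if PySem.Int.mod d 2 = 0 then E else O)
      = (List.replicate j [E, O]).flatten := by
  intro j
  induction j with
  | zero => simp [PySem.List.pyRange_one_eq_nil]
  | succ j ih =>
      have h2 : (2 : Int) * ((j : Int) + 1) = 2 * (j : Int) + 2 := by ring
      push_cast
      rw [h2, PySem.List.pyRange_one_cons (by omega),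
          PySem.List.pyRange_one_cons (by omega)]
      have h01 : (0 : Int) + 1 + 1 = 2 := by norm_num
      rw [h01, shift_pyRange]
      simp only [List.map_cons, List.map_map]
      have hg0 : (if PySem.Int.mod (0 : Int) 2 = 0 then E else O) = E := by
        simp [PySem.Int.mod]
      have hg1 : (if PySem.Int.mod ((0 : Int) + 1) 2 = 0 then E else O) = O := by
        norm_num [PySem.Int.mod, Int.fmod]
      rw [hg0, hg1]
      have hcomp : ((fun d => if PySem.Int.mod d 2 = 0 then E else O) ∘ fun x => x + 2)
          = (fun d => if PySem.Int.mod d 2 = 0 then E else O) := by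
        funext d
        simp [Function.comp, PySem.Int.mod]
      rw [hcomp, ih]
      simp [List.replicate_succ]

theorem fdiv_two_eq (a : Int) : a.fdiv 2 = a / 2 := by
  rw [Int.fdiv_eq_ediv]
  simp

-- ===== VERDICT (by name: the statement is the Claim_ definition above) =====
theorem brick_wall_spec : Claim_equal_brick_wall := by
  intro n depth _
  unfold Spec_brick_wall brick_wall brick_wall_alt
  simp only []
  refine Prod.ext rfl ?_
  -- name A's two layers
  set f : Int → Int × Int := fun i => (i, i + 1) with hf
  set E := (PySem.List.pyRange 0 (n - 1) 2).map f with hE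
  set O := (PySem.List.pyRange 1 (n - 1) 2).map f with hO
  -- A's side is a map of the parity selector over range(depth)
  have hA : (PySem.List.pyRange 0 depth 1).foldl
      (fun acc d => acc ++ [(PySem.List.pyRange (if PySem.Int.mod d 2 = 0 then 0 else 1) (n - 1) 2).map f]) []
      = (PySem.List.pyRange 0 depth 1).map (fun d => if PySem.Int.mod d 2 = 0 then E else O) := by
    rw [foldl_append_map, List.nil_append]
    apply List.map_congr_left
    intro d _
    by_cases h : PySem.Int.mod d 2 = 0
    · rw [if_pos h, if_pos h]
    · rw [if_neg h, if_neg h]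
  rw [hA]
  -- B's fold produces exactly E and O
  have hfold : (List.zip (PySem.List.pyRange 0 n 1) (PySem.List.pyRange 1 n 1)).foldl bwStep ([], [], true)
      = (E, O, (true : Bool).xor ((((PySem.List.pyRange 0 (n-1) 1).map f).length % 2) == 1)) := by
    rw [zip_ranges, bwFold_distrib]
    simp only [List.nil_append]
    rw [pvEvens_map, pvOdds_map, pvEvens_pyRange ((n - 1 - 0).toNat) 0 (n - 1) le_rfl,
        pvOdds_pyRange]
    norm_num
    exact ⟨rfl, rfl⟩
  rw [hfold]
  simp only []
  -- now the replicate/slice side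
  set g : Int → List (Int × Int) := fun d => if PySem.Int.mod d 2 = 0 then E else O with hg
  set k : Int := PySem.Int.floordiv (max depth 0 + 1) 2 with hk
  have hkval : k = (max depth 0 + 1) / 2 := by
    rw [hk]; unfold PySem.Int.floordiv; exact fdiv_two_eq _
  by_cases hd : depth ≤ 0
  · have hk0 : k.toNat = 0 := by omega
    rw [hk0]
    simp [PySem.List.slice, PySem.List.pyRange_one_eq_nil hd]
  · have hd : 0 < depth := by omega
    have hk1 : 0 ≤ k := by omega
    have hk2 : depth ≤ 2 * k := by omega
    rw [PySem.List.slice_to ((List.replicate k.toNat [E, O]).flatten) (le_of_lt hd)]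
    have hM : (2 : Int) * (k.toNat : Int) = 2 * k := by omega
    rw [← repFlatten E O k.toNat, hM]
    rw [PySem.List.pyRange_one 0 (2 * k), PySem.List.pyRange_one 0 depth]
    rw [← List.map_take, ← List.map_take, List.take_range]
    have hmin : min depth.toNat (2 * k - 0).toNat = (depth - 0).toNat := by omega
    rw [hmin]
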